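-- pv_equiv track=rewrite | github.com/welliam/http-server | src/server.py | combine_continued_headers
-- ===== SOURCE A (Python) =====
-- import string
--
-- class HTTPException(Exception):
--     pass
--
-- def combine_continued_headers(headers):
--     result = []
--     for line in headers:
--         if line and line[0] in string.whitespace:
--             try:
--                 result[-1] += line.lstrip()
--             except IndexError:
--                 raise HTTPException('First header line started with whitespace.')
--         else:
--             result.append(line)
--     return result
-- ===== SOURCE B (Python) =====
-- import string
--
--
-- class HTTPException(Exception):
--     pass
--
--
-- def combine_continued_headers(headers):
--     # Back-to-front pass: walk lines in reverse carrying the pending continuation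
--     # suffix for the next (earlier) header line; validity is checked up front.
--     if headers and headers[0] and headers[0][0] in string.whitespace:
--         raise HTTPException('First header line started with whitespace.')
--     result = []
--     pending = ''
--     for line in reversed(headers):
--         if line and line[0] in string.whitespace:
--             pending = line.lstrip() + pending
--         else:
--             result.append(line + pending)
--             pending = ''
--     result.reverse()
--     return result
-- ===== Notes on version B (the rewrite author's own statement) =====
-- stated objective: alternative
-- what changed: B validates the first line up front, then builds the result in a single back-to-front pass that carries the pending lstrip()-ed continuation suffix and attaches it when a header head is reached, reversing at the end, instead of A's forward pass mutating result[-1].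
import Mathlib
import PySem

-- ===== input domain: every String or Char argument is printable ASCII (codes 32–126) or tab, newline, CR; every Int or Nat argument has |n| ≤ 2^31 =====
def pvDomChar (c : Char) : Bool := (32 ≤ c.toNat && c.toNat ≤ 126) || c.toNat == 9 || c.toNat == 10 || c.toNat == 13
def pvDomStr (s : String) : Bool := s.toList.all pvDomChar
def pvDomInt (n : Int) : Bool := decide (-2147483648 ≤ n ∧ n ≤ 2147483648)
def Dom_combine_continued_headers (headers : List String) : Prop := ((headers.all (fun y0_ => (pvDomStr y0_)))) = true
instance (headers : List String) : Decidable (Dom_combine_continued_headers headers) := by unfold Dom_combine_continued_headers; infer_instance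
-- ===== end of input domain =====

-- B rebuilds the result in a single back-to-front pass carrying the pending continuation
-- suffix; the equivalence below is about the return value on inputs where A does not raise.

-- shared helper: `c in string.whitespace` (exactly the six characters of string.whitespace)
def pvWS (c : Char) : Bool :=
  c == ' ' || c == '\t' || c == '\n' || c == '\x0b' || c == '\x0c' || c == '\r'

-- `line and line[0] in string.whitespace`
def pvCont (line : String) : Bool :=
  match line.toList with
  | c :: _ => pvWS c
  | [] => false

-- ===== PORT A =====
def ccdStepA (result : List String) (line : String) : List String :=
  if pvCont line then
    match result.getLast? with
    | some last => result.dropLast ++ [last ++ PySem.Str.lstrip line]  -- result[-1] += line.lstrip()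
    | none => []  -- Python raises HTTPException here (excluded by Pre_)
  else
    result ++ [line]

def combine_continued_headers (headers : List String) : List String :=
  headers.foldl ccdStepA []

-- ===== PORT B =====
-- one step of B's reversed loop, on the state (result, pending); iterating Python's
-- `for line in reversed(headers)` and the final `result.reverse()` is Lean's foldr
def ccdStepB (line : String) (st : List String × String) : List String × String :=
  if pvCont line then (st.1, PySem.Str.lstrip line ++ st.2)
  else ((line ++ st.2) :: st.1, "")

def combine_continued_headers_alt (headers : List String) : List String :=
  if pvCont (headers.headD "") then []  -- B raises HTTPException here (excluded by Pre_)
  else (headers.foldr ccdStepB ([], "")).1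

-- ===== PRECONDITION & SPEC =====
-- Pre_ excludes exactly the inputs on which A raises HTTPException: a first line that is
-- nonempty and starts with whitespace (B raises the same exception there).
def Pre_combine_continued_headers (headers : List String) : Prop :=
  pvCont (headers.headD "") = false
instance (headers : List String) : Decidable (Pre_combine_continued_headers headers) := by
  unfold Pre_combine_continued_headers; infer_instance

def pvWitness_combine_continued_headers : List String :=
  ["Host: example.com", " continued", "Accept: */*", "", "\tmore"]

def Spec_combine_continued_headers (headers : List String) (out : List String) : Prop := out = combine_continued_headers_alt headers
instance (headers : List String) (out : List String) : Decidable (Spec_combine_continued_headers headers out) := by unfold Spec_combine_continued_headers; infer_instance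

-- ===== CLAIM (what is proved, stated in full; the proofs are below) =====
def Claim_equal_combine_continued_headers : Prop := ∀ (headers : List String), Dom_combine_continued_headers headers → Pre_combine_continued_headers headers → Spec_combine_continued_headers headers (combine_continued_headers headers)

-- ===== LEMMAS AND PROOFS =====

-- forward recursion with the current last header as explicit state (bridge between the folds)
def ccdG (x : String) : List String → List String
  | [] => [x]
  | l :: t => if pvCont l then ccdG (x ++ PySem.Str.lstrip l) t else x :: ccdG l t

lemma foldlA_eq_ccdG (lines : List String) (r : List String) (x : String) :
    lines.foldl ccdStepA (r ++ [x]) = r ++ ccdG x lines := by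
  induction lines generalizing r x with
  | nil => rfl
  | cons l t ih =>
      simp only [List.foldl_cons, ccdStepA, ccdG]
      by_cases h : pvCont l = true
      · simp [h, ih]
      · simp only [h, Bool.false_eq_true, if_false]
        rw [show (r ++ [x]) ++ [l] = (r ++ [x]) ++ [l] from rfl, ih]
        simp

lemma ccdG_eq_foldrB (lines : List String) (x : String) :
    ccdG x lines = (x ++ (lines.foldr ccdStepB ([], "")).2) :: (lines.foldr ccdStepB ([], "")).1 := by
  induction lines generalizing x with
  | nil => simp [ccdG]
  | cons l t ih =>
      simp only [List.foldr_cons, ccdG, ccdStepB]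
      by_cases h : pvCont l = true
      · simp [h, ih, String.append_assoc]
      · simp [h, ih]

-- ===== VERDICT (by name: the statement is the Claim_ definition above) =====
theorem combine_continued_headers_spec : Claim_equal_combine_continued_headers := by
  intro headers _ hpre
  unfold Spec_combine_continued_headers combine_continued_headers combine_continued_headers_alt
  cases headers with
  | nil => rfl
  | cons h t =>
      have hc : pvCont h = false := hpre
      simp only [List.headD, hc, Bool.false_eq_true, if_false, List.foldl_cons, ccdStepA,
        List.foldr_cons]
      rw [foldlA_eq_ccdG t [] h, List.nil_append, ccdG_eq_foldrB]
      simp [ccdStepB, hc]
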